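-- pv_equiv track=rewrite | github.com/Tesakt/trng | final.py | zigzag_scan
-- ===== SOURCE A (Python) =====
-- def zigzag_scan(matrix):
--     """
--     Perform zigzag scan on the matrix.
--     """
--     if not matrix:
--         return []
--
--     result = []
--     rows, cols = len(matrix), len(matrix[0])
--     row, col = 0, 0
--     going_down = True
--
--     while row < rows and col < cols:
--         result.append(matrix[row][col])
--         if going_down:
--             if row == rows - 1:
--                 col += 1
--                 going_down = False
--             elif col == 0:
--                 row += 1
--                 going_down = False
--             else:
--                 row += 1
--                 col -= 1
--         else:
--             if col == cols - 1:
--                 row += 1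
--                 going_down = True
--             elif row == 0:
--                 col += 1
--                 going_down = True
--             else:
--                 row -= 1
--                 col += 1
--
--     return [result[i:i+128] for i in range(0, len(result), 128)]
-- ===== SOURCE B (Python) =====
-- def zigzag_scan(matrix):
--     """
--     Perform zigzag scan on the matrix (diagonal-by-diagonal closed-form traversal).
--     """
--     if not matrix:
--         return []
--     rows, cols = len(matrix), len(matrix[0])
--
--     def diag(d):
--         lo, hi = max(0, d - cols + 1), min(d, rows - 1)
--         rs = range(lo, hi + 1) if d % 2 == 0 else range(hi, lo - 1, -1)
--         return [matrix[r][d - r] for r in rs]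
--
--     result = [x for d in range(rows + cols - 1) for x in diag(d)]
--     return [result[i:i + 128] for i in range(0, len(result), 128)]
-- ===== Notes on version B (the rewrite author's own statement) =====
-- stated objective: simpler
-- what changed: Replaces A's cell-by-cell walker with direction/bounce state (going_down flag, three-way edge cases per step) by a closed-form per-diagonal traversal: for each diagonal d take rows max(0,d-cols+1)..min(d,rows-1), ascending for even d and descending for odd d.
import Mathlib
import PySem

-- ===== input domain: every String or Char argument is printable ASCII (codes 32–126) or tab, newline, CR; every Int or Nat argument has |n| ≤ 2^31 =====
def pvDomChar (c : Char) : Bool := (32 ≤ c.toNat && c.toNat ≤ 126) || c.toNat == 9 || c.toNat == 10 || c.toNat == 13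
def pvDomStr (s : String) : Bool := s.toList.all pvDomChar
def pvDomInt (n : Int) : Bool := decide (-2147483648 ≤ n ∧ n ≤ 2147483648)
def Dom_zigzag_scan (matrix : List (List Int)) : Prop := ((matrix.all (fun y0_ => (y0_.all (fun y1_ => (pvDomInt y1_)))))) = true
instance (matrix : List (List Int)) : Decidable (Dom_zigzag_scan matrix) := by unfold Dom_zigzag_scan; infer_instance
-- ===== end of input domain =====

-- B replaces A's cell-by-cell zigzag state machine by a per-diagonal closed-form traversal (simpler; no direction/bounce bookkeeping).

-- ===== PORT A =====
-- A's while-loop walker. Fuel is a crude upper bound on the iteration count (each of the ≤ rows*cols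
-- cells is visited once); it never runs out on the inputs A terminates on, which is all of them.
def zzLoopA (m : List (List Int)) (rows cols : Int) : Nat → Int → Int → Bool → List Int
  | 0, _, _, _ => []
  | fuel+1, row, col, gd =>
    if row < rows ∧ col < cols then
      -- matrix[row][col]; the default 0 is only reached where Python raises (outside Pre_)
      PySem.List.pyGetD (PySem.List.pyGetD m row []) col 0 ::
      (if gd then
        if row = rows - 1 then zzLoopA m rows cols fuel row (col+1) false
        else if col = 0 then zzLoopA m rows cols fuel (row+1) col false
        else zzLoopA m rows cols fuel (row+1) (col-1) true
      else
        if col = cols - 1 then zzLoopA m rows cols fuel (row+1) col true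
        else if row = 0 then zzLoopA m rows cols fuel row (col+1) true
        else zzLoopA m rows cols fuel (row-1) (col+1) false)
    else []

-- [result[i:i+128] for i in range(0, len(result), 128)]
def zzChunkA (res : List Int) : List (List Int) :=
  (PySem.List.pyRange 0 (res.length : Int) 128).map
    (fun i => PySem.List.slice res (some i) (some (i + 128)))

def zigzag_scan (matrix : List (List Int)) : List (List Int) :=
  if matrix = [] then []
  else
    let rows : Int := matrix.length
    let cols : Int := (matrix.headD []).length
    zzChunkA (zzLoopA matrix rows cols (((rows+cols)*(rows+cols)).toNat + 1) 0 0 true)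

-- ===== PORT B =====
-- diag(d): [matrix[r][d-r] for r in rs]
def zzDiagB (m : List (List Int)) (rows cols d : Int) : List Int :=
  let lo : Int := max 0 (d - cols + 1)
  let hi : Int := min d (rows - 1)
  let rs := if PySem.Int.mod d 2 = 0 then PySem.List.pyRange lo (hi + 1) 1
            else PySem.List.pyRange hi (lo - 1) (-1)
  rs.map (fun r => PySem.List.pyGetD (PySem.List.pyGetD m r []) (d - r) 0)

-- [result[i:i+128] for i in range(0, len(result), 128)]
def zzChunkB (res : List Int) : List (List Int) :=
  (PySem.List.pyRange 0 (res.length : Int) 128).map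
    (fun i => PySem.List.slice res (some i) (some (i + 128)))

def zigzag_scan_alt (matrix : List (List Int)) : List (List Int) :=
  if matrix = [] then []
  else
    let rows : Int := matrix.length
    let cols : Int := (matrix.headD []).length
    let result := (PySem.List.pyRange 0 (rows + cols - 1) 1).flatMap (zzDiagB matrix rows cols)
    zzChunkB result

-- ===== PRECONDITION & SPEC =====
-- Pre_ excludes exactly the jagged matrices with a row shorter than the first row: there the walk
-- reaches a cell outside that row and Python A raises IndexError (B raises there too).
def Pre_zigzag_scan (matrix : List (List Int)) : Prop :=
  ∀ row ∈ matrix, (matrix.headD []).length ≤ row.length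
instance (matrix : List (List Int)) : Decidable (Pre_zigzag_scan matrix) := by
  unfold Pre_zigzag_scan; infer_instance

def pvWitness_zigzag_scan : List (List Int) := [[1, 2, 3], [4, 5, 6], [7, 8, 9]]

def Spec_zigzag_scan (matrix : List (List Int)) (out : List (List Int)) : Prop := out = zigzag_scan_alt matrix
instance (matrix : List (List Int)) (out : List (List Int)) : Decidable (Spec_zigzag_scan matrix out) := by unfold Spec_zigzag_scan; infer_instance

-- ===== CLAIM (what is proved, stated in full; the proofs are below) =====
def Claim_equal_zigzag_scan : Prop := ∀ (matrix : List (List Int)), Dom_zigzag_scan matrix → Pre_zigzag_scan matrix → Spec_zigzag_scan matrix (zigzag_scan matrix)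

-- ===== LEMMAS AND PROOFS =====

-- the suffix of B's flattened diagonal list, from diagonal d0 on
def zzTail (m : List (List Int)) (R C d0 : Int) : List Int :=
  (PySem.List.pyRange d0 (R + C - 1) 1).flatMap (zzDiagB m R C)


-- matrix[r][d-r]
def zzAt (m : List (List Int)) (r d : Int) : Int :=
  PySem.List.pyGetD (PySem.List.pyGetD m r []) (d - r) 0

-- the part of diagonal d = r+c that A's walker still has to emit, from row r in direction gd
def zzPart (m : List (List Int)) (R C r d : Int) (gd : Bool) : List Int :=
  (if gd then PySem.List.pyRange r (min d (R - 1) + 1) 1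
   else PySem.List.pyRange r (max 0 (d - C + 1) - 1) (-1)).map (fun r' => zzAt m r' d)

-- cells still to emit within the current diagonal, minus one
def zzDist (R C r d : Int) (gd : Bool) : Int :=
  if gd then min d (R - 1) - r else r - max 0 (d - C + 1)

-- fuel measure: strictly decreases at every loop iteration
def zzM (R C d dist : Int) : Int := (R + C) * ((R + C - 2) - d) + dist + 1

lemma zzLoopA_exit (m : List (List Int)) (R C : Int) (fuel : Nat) (r c : Int) (gd : Bool)
    (h : ¬ (r < R ∧ c < C)) : zzLoopA m R C fuel r c gd = [] := by
  cases fuel <;> simp [zzLoopA, h]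

lemma zzTail_cons (m : List (List Int)) (R C d : Int) (h : d < R + C - 1) :
    zzTail m R C d = zzDiagB m R C d ++ zzTail m R C (d + 1) := by
  unfold zzTail
  rw [PySem.List.pyRange_one_cons h, List.flatMap_cons]

lemma zzTail_nil (m : List (List Int)) (R C d : Int) (h : R + C - 1 <= d) :
    zzTail m R C d = [] := by
  unfold zzTail
  rw [PySem.List.pyRange_one_eq_nil h, List.flatMap_nil]

lemma zzDiagB_even (m : List (List Int)) (R C d : Int) (h : d % 2 = 0) :
    zzDiagB m R C d = zzPart m R C (max 0 (d - C + 1)) d true := by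
  unfold zzDiagB zzPart zzAt
  rw [PySem.Int.mod_eq_emod_of_pos (by omega : (0:Int) < 2)]
  simp [h]

lemma zzDiagB_odd (m : List (List Int)) (R C d : Int) (h : ¬ d % 2 = 0) :
    zzDiagB m R C d = zzPart m R C (min d (R - 1)) d false := by
  unfold zzDiagB zzPart zzAt
  rw [PySem.Int.mod_eq_emod_of_pos (by omega : (0:Int) < 2)]
  simp [h]

lemma zzPart_cons_true (m : List (List Int)) (R C r d : Int) (h : r <= min d (R - 1)) :
    zzPart m R C r d true = zzAt m r d :: zzPart m R C (r + 1) d true := by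
  unfold zzPart
  rw [PySem.List.pyRange_one_cons (by omega)]
  simp

lemma zzPart_cons_false (m : List (List Int)) (R C r d : Int) (h : max 0 (d - C + 1) <= r) :
    zzPart m R C r d false = zzAt m r d :: zzPart m R C (r - 1) d false := by
  unfold zzPart
  rw [PySem.List.pyRange_neg_one_cons (by omega)]
  simp

lemma zzPart_nil_true (m : List (List Int)) (R C r d : Int) (h : min d (R - 1) < r) :
    zzPart m R C r d true = [] := by
  unfold zzPart
  rw [PySem.List.pyRange_one_eq_nil (by omega)]
  simp

lemma zzPart_nil_false (m : List (List Int)) (R C r d : Int) (h : r < max 0 (d - C + 1)) :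
    zzPart m R C r d false = [] := by
  unfold zzPart
  rw [PySem.List.pyRange_neg_one_eq_nil (by omega)]
  simp

lemma zzDist_le (R C r d : Int) (gd : Bool) (h0 : 0 <= r) (_hR : r < R) (_hC : 0 <= C) :
    zzDist R C r d gd <= R + C - 1 := by
  unfold zzDist; split <;> omega

lemma zzDist_true (R C r d : Int) : zzDist R C r d true = min d (R - 1) - r := rfl

lemma zzDist_false (R C r d : Int) : zzDist R C r d false = r - max 0 (d - C + 1) := rfl

lemma zzM_step_same (R C d x fuel : Int) (h : zzM R C d x <= fuel + 1) :
    zzM R C d (x - 1) <= fuel := by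
  unfold zzM at *
  generalize (R + C) * (R + C - 2 - d) = t at h ⊢
  omega

lemma zzM_step_next (R C d x y fuel : Int) (hx : 0 <= x) (hy : y <= R + C - 1)
    (h : zzM R C d x <= fuel + 1) : zzM R C (d + 1) y <= fuel := by
  unfold zzM at *
  have hring : (R + C) * (R + C - 2 - (d + 1)) = (R + C) * (R + C - 2 - d) - (R + C) := by ring
  rw [hring]
  generalize (R + C) * (R + C - 2 - d) = t at h ⊢
  omega

lemma zz_inv (m : List (List Int)) (R C : Int) (_hR : 0 < R) (hC : 0 < C) :
    ∀ (fuel : Nat) (r c : Int) (gd : Bool),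
      0 ≤ r → r < R → 0 ≤ c → c < C →
      gd = decide ((r + c) % 2 = 0) →
      zzM R C (r + c) (zzDist R C r (r + c) gd) ≤ (fuel : Int) →
      zzLoopA m R C fuel r c gd = zzPart m R C r (r + c) gd ++ zzTail m R C (r + c + 1) := by
  intro fuel
  induction fuel with
  | zero =>
    intro r c gd hr0 hrR hc0 hcC hgd hfuel
    exfalso
    have hE : (0:Int) ≤ (R + C - 2) - (r + c) := by omega
    have h1 : (0:Int) ≤ (R + C) * ((R + C - 2) - (r + c)) := mul_nonneg (by omega) hE
    have h2 : (0:Int) ≤ zzDist R C r (r + c) gd := by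
      unfold zzDist; split <;> omega
    unfold zzM at hfuel
    generalize (R + C) * ((R + C - 2) - (r + c)) = t at h1 hfuel
    simp only [Nat.cast_zero] at hfuel
    omega
  | succ fuel ih =>
    intro r c gd hr0 hrR hc0 hcC hgd hfuel
    have hfuel' : zzM R C (r + c) (zzDist R C r (r + c) gd) <= (fuel : Int) + 1 := by
      push_cast at hfuel; linarith
    rw [zzLoopA, if_pos ⟨hrR, hcC⟩]
    cases gd with
    | true =>
      have hpar : (r + c) % 2 = 0 := of_decide_eq_true hgd.symm
      have hemit : PySem.List.pyGetD (PySem.List.pyGetD m r []) c 0 = zzAt m r (r + c) := by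
        unfold zzAt; rw [add_sub_cancel_left]
      rw [hemit]
      simp only [↓reduceIte]
      by_cases h1 : r = R - 1
      · -- bounce off the bottom row: step right, direction flips
        rw [if_pos h1]
        have hpart : zzPart m R C r (r + c) true = [zzAt m r (r + c)] := by
          rw [zzPart_cons_true m R C r (r + c) (by omega),
            zzPart_nil_true m R C (r + 1) (r + c) (by omega)]
        by_cases h2 : c + 1 < C
        · rw [ih r (c + 1) false hr0 hrR (by omega) h2 (decide_eq_false (by omega)).symm
            (by
              have hx : (0:Int) <= zzDist R C r (r + c) true := by rw [zzDist_true]; omega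
              have hy := zzDist_le R C r (r + c + 1) false hr0 hrR (by omega)
              have h := zzM_step_next R C (r + c) _ _ (fuel : Int) hx hy hfuel'
              rw [show r + (c + 1) = r + c + 1 from by ring]
              exact h)]
          rw [show r + (c + 1) = r + c + 1 from by ring, hpart,
            zzTail_cons m R C (r + c + 1) (by omega),
            zzDiagB_odd m R C (r + c + 1) (by omega),
            show min (r + c + 1) (R - 1) = r from by omega]
          simp
        · rw [zzLoopA_exit m R C fuel r (c + 1) false (by omega), hpart,
            zzTail_nil m R C (r + c + 1) (by omega)]
          simp
      · rw [if_neg h1]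
        by_cases h2 : c = 0
        · -- bounce off the left column: step down, direction flips
          rw [if_pos h2]
          have hpart : zzPart m R C r (r + c) true = [zzAt m r (r + c)] := by
            rw [zzPart_cons_true m R C r (r + c) (by omega),
              zzPart_nil_true m R C (r + 1) (r + c) (by omega)]
          rw [ih (r + 1) c false (by omega) (by omega) hc0 hcC (decide_eq_false (by omega)).symm
            (by
              have hx : (0:Int) <= zzDist R C r (r + c) true := by rw [zzDist_true]; omega
              have hy := zzDist_le R C (r + 1) (r + c + 1) false (by omega) (by omega) (by omega)
              have h := zzM_step_next R C (r + c) _ _ (fuel : Int) hx hy hfuel'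
              rw [show r + 1 + c = r + c + 1 from by ring]
              exact h)]
          rw [show r + 1 + c = r + c + 1 from by ring, hpart,
            zzTail_cons m R C (r + c + 1) (by omega),
            zzDiagB_odd m R C (r + c + 1) (by omega),
            show min (r + c + 1) (R - 1) = r + 1 from by omega]
          simp
        · -- interior: move down-left along the diagonal
          rw [if_neg h2]
          rw [ih (r + 1) (c - 1) true (by omega) (by omega) (by omega) (by omega)
            (decide_eq_true (by omega : (r + 1 + (c - 1)) % 2 = 0)).symm
            (by
              rw [show r + 1 + (c - 1) = r + c from by ring, zzDist_true]
              rw [zzDist_true] at hfuel'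
              have h := zzM_step_same R C (r + c) (min (r + c) (R - 1) - r) (fuel : Int) hfuel'
              rw [show min (r + c) (R - 1) - (r + 1) = min (r + c) (R - 1) - r - 1 from by ring]
              exact h)]
          rw [show r + 1 + (c - 1) = r + c from by ring,
            zzPart_cons_true m R C r (r + c) (by omega)]
          simp
    | false =>
      have hpar : ¬ (r + c) % 2 = 0 := of_decide_eq_false hgd.symm
      have hemit : PySem.List.pyGetD (PySem.List.pyGetD m r []) c 0 = zzAt m r (r + c) := by
        unfold zzAt; rw [add_sub_cancel_left]
      rw [hemit]
      simp only [Bool.false_eq_true, ↓reduceIte]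
      by_cases h1 : c = C - 1
      · -- bounce off the right column: step down, direction flips
        rw [if_pos h1]
        have hpart : zzPart m R C r (r + c) false = [zzAt m r (r + c)] := by
          rw [zzPart_cons_false m R C r (r + c) (by omega),
            zzPart_nil_false m R C (r - 1) (r + c) (by omega)]
        by_cases h2 : r + 1 < R
        · rw [ih (r + 1) c true (by omega) h2 hc0 hcC
            (decide_eq_true (by omega : (r + 1 + c) % 2 = 0)).symm
            (by
              have hx : (0:Int) <= zzDist R C r (r + c) false := by rw [zzDist_false]; omega
              have hy := zzDist_le R C (r + 1) (r + c + 1) true (by omega) h2 (by omega)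
              have h := zzM_step_next R C (r + c) _ _ (fuel : Int) hx hy hfuel'
              rw [show r + 1 + c = r + c + 1 from by ring]
              exact h)]
          rw [show r + 1 + c = r + c + 1 from by ring, hpart,
            zzTail_cons m R C (r + c + 1) (by omega),
            zzDiagB_even m R C (r + c + 1) (by omega),
            show max 0 (r + c + 1 - C + 1) = r + 1 from by omega]
          simp
        · rw [zzLoopA_exit m R C fuel (r + 1) c true (by omega), hpart,
            zzTail_nil m R C (r + c + 1) (by omega)]
          simp
      · rw [if_neg h1]
        by_cases h2 : r = 0
        · -- bounce off the top row: step right, direction flips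
          rw [if_pos h2]
          have hpart : zzPart m R C r (r + c) false = [zzAt m r (r + c)] := by
            rw [zzPart_cons_false m R C r (r + c) (by omega),
              zzPart_nil_false m R C (r - 1) (r + c) (by omega)]
          rw [ih r (c + 1) true hr0 hrR (by omega) (by omega)
            (decide_eq_true (by omega : (r + (c + 1)) % 2 = 0)).symm
            (by
              have hx : (0:Int) <= zzDist R C r (r + c) false := by rw [zzDist_false]; omega
              have hy := zzDist_le R C r (r + c + 1) true hr0 hrR (by omega)
              have h := zzM_step_next R C (r + c) _ _ (fuel : Int) hx hy hfuel'
              rw [show r + (c + 1) = r + c + 1 from by ring]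
              exact h)]
          rw [show r + (c + 1) = r + c + 1 from by ring, hpart,
            zzTail_cons m R C (r + c + 1) (by omega),
            zzDiagB_even m R C (r + c + 1) (by omega),
            show max 0 (r + c + 1 - C + 1) = r from by omega]
          simp
        · -- interior: move up-right along the diagonal
          rw [if_neg h2]
          rw [ih (r - 1) (c + 1) false (by omega) (by omega) (by omega) (by omega)
            (decide_eq_false (by omega)).symm
            (by
              rw [show r - 1 + (c + 1) = r + c from by ring, zzDist_false]
              rw [zzDist_false] at hfuel'
              have h := zzM_step_same R C (r + c) (r - max 0 (r + c - C + 1)) (fuel : Int) hfuel'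
              rw [show r - 1 - max 0 (r + c - C + 1) = r - max 0 (r + c - C + 1) - 1 from by ring]
              exact h)]
          rw [show r - 1 + (c + 1) = r + c from by ring,
            zzPart_cons_false m R C r (r + c) (by omega)]
          simp

lemma zzDiagB_nil_of_C0 (m : List (List Int)) (R C d : Int) (hC : C = 0) :
    zzDiagB m R C d = [] := by
  unfold zzDiagB
  rw [PySem.Int.mod_eq_emod_of_pos (by omega : (0:Int) < 2)]
  dsimp only
  by_cases h : d % 2 = 0
  · rw [if_pos h, PySem.List.pyRange_one_eq_nil (by omega)]; simp
  · rw [if_neg h, PySem.List.pyRange_neg_one_eq_nil (by omega)]; simp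

lemma zzChunk_eq (res : List Int) : zzChunkA res = zzChunkB res := rfl

-- ===== VERDICT (by name: the statement is the Claim_ definition above) =====
theorem zigzag_scan_spec : Claim_equal_zigzag_scan := by
  unfold Claim_equal_zigzag_scan
  intro matrix _ _
  unfold Spec_zigzag_scan zigzag_scan zigzag_scan_alt
  by_cases hm : matrix = []
  · rw [if_pos hm, if_pos hm]
  · rw [if_neg hm, if_neg hm]
    dsimp only
    rw [zzChunk_eq]
    refine congrArg zzChunkB ?_
    set R : Int := (matrix.length : Int) with hRdef
    set C : Int := ((matrix.headD []).length : Int) with hCdef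
    have hR1 : 0 < R := by
      have h0 : matrix.length ≠ 0 := fun h => hm (List.length_eq_zero_iff.mp h)
      omega
    have htail : (PySem.List.pyRange 0 (R + C - 1) 1).flatMap (zzDiagB matrix R C)
        = zzTail matrix R C 0 := rfl
    rw [htail]
    have hC0 : 0 ≤ C := by positivity
    by_cases hC1 : C = 0
    · rw [zzLoopA_exit matrix R C _ 0 0 true (by omega)]
      unfold zzTail
      rw [List.flatMap_eq_nil_iff.mpr]
      intro d _
      exact zzDiagB_nil_of_C0 matrix R C d hC1
    · have hCpos : 0 < C := by omega
      have hfuelpf : zzM R C (0 + 0) (zzDist R C 0 (0 + 0) true)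
          ≤ ((((R + C) * (R + C)).toNat + 1 : Nat) : Int) := by
        rw [zzDist_true]
        have hk : (0:Int) ≤ R + C := by omega
        have htn : ((((R + C) * (R + C)).toNat : Nat) : Int) = (R + C) * (R + C) :=
          Int.toNat_of_nonneg (mul_nonneg hk hk)
        have hmul : (R + C) * (R + C - 2) ≤ (R + C) * (R + C) :=
          mul_le_mul_of_nonneg_left (by omega) hk
        unfold zzM
        push_cast
        rw [htn]
        have hmin : min (0:Int) (R - 1) = 0 := by omega
        rw [hmin]
        linarith
      rw [zz_inv matrix R C hR1 hCpos _ 0 0 true le_rfl hR1 le_rfl hCpos (by decide) hfuelpf]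
      rw [zzTail_cons matrix R C 0 (by omega),
        zzDiagB_even matrix R C 0 (by decide),
        show max (0:Int) (0 - C + 1) = 0 from by omega]
      norm_num
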